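-- pv_equiv track=rewrite | github.com/W1-Projects/b01lersCTF-2026 | solved/rev/indirect-memory-access/solve.py | decode_buttons
-- ===== SOURCE A (Python) =====
-- def decode_buttons(bits: str) -> str:
--     alphabet = "absSRLUDrl"
--     out = []
--     zeros = 0
--     for bit in bits:
--         if bit == "0":
--             zeros += 1
--             continue
--         out.append(alphabet[zeros])
--         zeros = 0
--     if zeros:
--         raise ValueError("bitstream does not end cleanly on a token boundary")
--     return "".join(out)
-- ===== SOURCE B (Python) =====
-- def decode_buttons(bits: str) -> str:
--     alphabet = "absSRLUDrl"
--     # Any non-'0' character terminates a token, so normalize every terminator to a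
--     # single delimiter, split the stream into the zero-runs, and map run lengths.
--     table = {ord(c): "|" for c in set(bits) if c != "0"}
--     parts = bits.translate(table).split("|")
--     if parts[-1]:
--         raise ValueError("bitstream does not end cleanly on a token boundary")
--     return "".join(alphabet[len(p)] for p in parts[:-1])
-- ===== Notes on version B (the rewrite author's own statement) =====
-- stated objective: alternative
-- what changed: B replaces A's single-pass zero-counter state machine with a staged pipeline: translate every terminator character to one delimiter, split the stream into its zero-runs with str.split, map each run's length through the alphabet, and join; the unterminated trailing run shows up as a nonempty last part.
import Mathlib
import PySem

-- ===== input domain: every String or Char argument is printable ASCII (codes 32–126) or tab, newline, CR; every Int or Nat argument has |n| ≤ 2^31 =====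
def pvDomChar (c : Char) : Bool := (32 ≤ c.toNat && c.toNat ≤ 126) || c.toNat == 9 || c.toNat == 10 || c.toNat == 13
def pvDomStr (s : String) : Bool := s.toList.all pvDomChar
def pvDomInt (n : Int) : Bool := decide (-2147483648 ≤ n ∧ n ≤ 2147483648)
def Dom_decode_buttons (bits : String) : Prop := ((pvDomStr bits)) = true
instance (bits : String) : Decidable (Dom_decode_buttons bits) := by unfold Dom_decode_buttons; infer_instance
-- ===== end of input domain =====

-- B replaces A's per-character zero-counter state machine by a staged pipeline: normalize
-- every terminator to one delimiter, split the stream into its zero-runs, map run lengths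
-- through the alphabet (objective: alternative decomposition, same O(n) cost).
-- On inputs excluded by Pre_ both Pythons raise (ValueError / IndexError); the ports return
-- a total value there instead.

-- ===== PORT A =====
-- per-character loop with (out, zeros) state; alphabet[zeros] with zeros ≥ 10 raises
-- IndexError in Python (outside Pre_), the port uses a placeholder ' ' there.
def decode_buttons (bits : String) : String :=
  String.mk (bits.toList.foldl (fun (s : List Char × Nat) bit =>
    if bit = '0' then (s.1, s.2 + 1)
    else (s.1 ++ [(PySem.Str.pyGet? "absSRLUDrl" (s.2 : Int)).getD ' '], 0)) ([], 0)).1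

-- ===== PORT B =====
-- Source B: translate every non-'0' character to the delimiter '|', split on it, and map the
-- run lengths through the alphabet; str.translate/str.split are ported as List.map/List.splitOn.
-- The ValueError branch (nonempty last part) is outside Pre_; the port returns the join regardless.
def decode_buttons_alt (bits : String) : String :=
  let parts := (bits.toList.map (fun c => if c = '0' then c else '|')).splitOn '|'
  String.mk (parts.dropLast.map
    (fun p => (PySem.Str.pyGet? "absSRLUDrl" (p.length : Int)).getD ' '))

-- ===== PRECONDITION & SPEC =====
-- Pre_ holds exactly where the Python A returns normally: it excludes bitstreams whose last
-- character is a zero (the final token is unterminated, ValueError in both Pythons) and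
-- bitstreams containing a run of ten zeros, which is then necessarily terminated and indexes
-- past the 10-letter alphabet (IndexError in both Pythons).
def Pre_decode_buttons (bits : String) : Prop :=
  bits.toList.getLast? ≠ some '0' ∧ ¬ (List.replicate 10 '0' <:+: bits.toList)
instance (bits : String) : Decidable (Pre_decode_buttons bits) := by
  unfold Pre_decode_buttons; infer_instance

def pvWitness_decode_buttons : String := "001s0100r"

def Spec_decode_buttons (bits : String) (out : String) : Prop := out = decode_buttons_alt bits
instance (bits : String) (out : String) : Decidable (Spec_decode_buttons bits out) := by unfold Spec_decode_buttons; infer_instance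

-- ===== CLAIM (what is proved, stated in full; the proofs are below) =====
def Claim_equal_decode_buttons : Prop := ∀ (bits : String), Dom_decode_buttons bits → Pre_decode_buttons bits → Spec_decode_buttons bits (decode_buttons bits)

-- ===== LEMMAS AND PROOFS =====

-- character-by-character reference emitter bridging the two ports
def pvEmit : Nat → List Char → List Char
  | _, [] => []
  | z, c :: l =>
    if c = '0' then pvEmit (z + 1) l
    else (PySem.Str.pyGet? "absSRLUDrl" (z : Int)).getD ' ' :: pvEmit 0 l

theorem foldA_emit (l : List Char) : ∀ (out : List Char) (z : Nat),
    (l.foldl (fun (s : List Char × Nat) bit =>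
      if bit = '0' then (s.1, s.2 + 1)
      else (s.1 ++ [(PySem.Str.pyGet? "absSRLUDrl" (s.2 : Int)).getD ' '], 0)) (out, z)).1
      = out ++ pvEmit z l := by
  induction l with
  | nil => intro out z; simp [pvEmit]
  | cons c l ih =>
    intro out z
    by_cases hc : c = '0'
    · rw [List.foldl_cons, if_pos hc]
      simpa [pvEmit, hc] using ih out (z + 1)
    · rw [List.foldl_cons, if_neg hc]
      simpa [pvEmit, hc, List.append_assoc] using
        ih (out ++ [(PySem.Str.pyGet? "absSRLUDrl" (z : Int)).getD ' ']) 0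

-- splitting the normalized stream after a prefix of z zeros yields exactly pvEmit z
theorem split_emit (l : List Char) : ∀ z : Nat,
    ((List.replicate z '0' ++ l.map (fun c => if c = '0' then c else '|')).splitOn '|').dropLast.map
      (fun p => (PySem.Str.pyGet? "absSRLUDrl" ((p.length : Nat) : Int)).getD ' ')
    = pvEmit z l := by
  induction l with
  | nil =>
    intro z
    have h1 : (List.replicate z '0' ++ ([] : List Char).map (fun c => if c = '0' then c else '|'))
        = List.replicate z '0' := by simp
    rw [h1]
    have h2 : (List.replicate z '0').splitOn '|' = [List.replicate z '0'] := by
      apply List.splitOnP_eq_single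
      intro x hx
      simp_all [List.eq_of_mem_replicate hx]
    rw [h2]
    simp [pvEmit]
  | cons c l ih =>
    intro z
    by_cases hc : c = '0'
    · have h1 : List.replicate z '0' ++ (c :: l).map (fun c => if c = '0' then c else '|')
          = List.replicate (z + 1) '0' ++ l.map (fun c => if c = '0' then c else '|') := by
        simp [hc, List.replicate_succ']
      rw [h1, ih (z + 1)]
      simp [pvEmit, hc]
    · have h1 : List.replicate z '0' ++ (c :: l).map (fun c => if c = '0' then c else '|')
          = List.replicate z '0' ++ '|' :: l.map (fun c => if c = '0' then c else '|') := by
        simp [hc]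
      rw [h1]
      have h2 : (List.replicate z '0' ++ '|' :: l.map (fun c => if c = '0' then c else '|')).splitOn '|'
          = List.replicate z '0' :: (l.map (fun c => if c = '0' then c else '|')).splitOn '|' := by
        apply List.splitOnP_first
        · intro x hx
          simp [List.eq_of_mem_replicate hx]
        · simp
      rw [h2]
      have h3 : (l.map (fun c => if c = '0' then c else '|')).splitOn '|' ≠ [] :=
        List.splitOnP_ne_nil _ _
      rw [List.dropLast_cons_of_ne_nil h3, List.map_cons]
      have h4 := ih 0
      simp only [List.replicate_zero, List.nil_append] at h4
      rw [h4]
      simp [pvEmit, hc]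

-- ===== VERDICT (by name: the statement is the Claim_ definition above) =====
theorem decode_buttons_spec : Claim_equal_decode_buttons := by
  intro bits _ _
  unfold Spec_decode_buttons decode_buttons decode_buttons_alt
  rw [foldA_emit bits.toList [] 0]
  have := split_emit bits.toList 0
  simp only [List.replicate_zero, List.nil_append] at this
  rw [← this]
  rfl
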